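-- pv_equiv track=rewrite | github.com/YuanzhongLi/Practice_Competitive_Programming_Python | LeetCode/problems/0678.py | parse
-- ===== SOURCE A (Python) =====
-- def parse(s):
--     tmp = []
--     for ch in s:
--         if ch == ')':
--             find = False
--             for i in range(len(tmp)-1, -1, -1):
--                 if tmp[i] == '(':
--                     tmp[i] = ''
--                     find = True
--                     break
--             if not find:
--                 tmp.append(ch)
--         else:
--             tmp.append(ch)
--     ret = []
--     for ch in tmp:
--         if ch != '':
--             ret.append(ch)
--     return ret
-- ===== SOURCE B (Python) =====
-- def parse(s):
--     stack = []
--     matched = set()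
--     for i, ch in enumerate(s):
--         if ch == '(':
--             stack.append(i)
--         elif ch == ')' and stack:
--             matched.add(stack.pop())
--             matched.add(i)
--     return [ch for i, ch in enumerate(s) if i not in matched]
-- ===== Notes on version B (the rewrite author's own statement) =====
-- stated objective: alternative
-- what changed: B replaces A's per-')' backward rescan of the mutable output buffer (and the final blank-stripping pass) with a single forward pass keeping a stack of '(' indices that records matched positions in a set, then emits the unmatched characters in order.
import Mathlib
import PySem

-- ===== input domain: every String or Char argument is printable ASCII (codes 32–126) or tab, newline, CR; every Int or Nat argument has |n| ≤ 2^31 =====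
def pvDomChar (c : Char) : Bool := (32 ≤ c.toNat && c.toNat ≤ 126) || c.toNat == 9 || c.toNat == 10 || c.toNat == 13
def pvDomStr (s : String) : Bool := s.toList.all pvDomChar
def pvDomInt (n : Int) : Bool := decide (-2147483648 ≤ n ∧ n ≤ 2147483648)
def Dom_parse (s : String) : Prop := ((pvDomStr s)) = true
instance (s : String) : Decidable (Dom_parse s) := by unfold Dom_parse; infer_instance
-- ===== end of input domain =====

-- B: instead of A's backward rescans of a mutable buffer plus a final blank-stripping pass,
-- one forward pass with a stack of '(' indices marks matched positions in a set, and the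
-- unmatched characters are emitted in order.

-- a one-character Python string
def chStr (c : Char) : String := String.ofList [c]

-- ===== PORT A =====
-- A's inner loop "for i in range(len(tmp)-1,-1,-1): if tmp[i]=='(': tmp[i]=''; find=True; break":
-- blank the LAST '(' in tmp, none if there is no '(' (the recursion tries the suffix first, so it
-- prefers the last occurrence — exactly the backward scan).
def blankLastParen : List String → Option (List String)
  | [] => none
  | x :: xs =>
    match blankLastParen xs with
    | some ys => some (x :: ys)
    | none => if x = "(" then some ("" :: xs) else none

def parseStep (tmp : List String) (ch : Char) : List String :=
  if ch = ')' then
    match blankLastParen tmp with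
    | some tmp' => tmp'                 -- find = True: '(' blanked, ')' dropped
    | none => tmp ++ [chStr ch]         -- not find: append ')'
  else tmp ++ [chStr ch]

def parse (s : String) : List String :=
  (s.toList.foldl parseStep []).foldl (fun ret ch => if ch ≠ "" then ret ++ [ch] else ret) []

-- ===== PORT B =====
def parseAltStep (st : List Int × PySem.Set Int) (p : Int × Char) : List Int × PySem.Set Int :=
  if p.2 = '(' then (p.1 :: st.1, st.2)
  else if p.2 = ')' then
    match st.1 with
    | j :: rest => (rest, PySem.Set.add (PySem.Set.add st.2 j) p.1)
    | [] => st
  else st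

def parse_alt (s : String) : List String :=
  let e := PySem.List.enumerate s.toList 0
  let m := (e.foldl parseAltStep ([], PySem.Set.empty)).2
  e.filterMap (fun p => if p.1 ∈ m then none else some (chStr p.2))

-- ===== PRECONDITION & SPEC =====
def Spec_parse (s : String) (out : List String) : Prop := out = parse_alt s
instance (s : String) (out : List String) : Decidable (Spec_parse s out) := by unfold Spec_parse; infer_instance

-- ===== CLAIM (what is proved, stated in full; the proofs are below) =====
def Claim_equal_parse : Prop := ∀ (s : String), Dom_parse s → Spec_parse s (parse s)

-- ===== LEMMAS AND PROOFS =====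

-- the entry A's tmp holds for the input character p, given the set m of matched indices
def entryOf (m : List Int) (p : Int × Char) : Option String :=
  if p.1 ∈ m then (if p.2 = '(' then some "" else none) else some (chStr p.2)

def tmpOf (m : List Int) (l : List (Int × Char)) : List String := l.filterMap (entryOf m)

-- the not-yet-matched '(' entries, in input order
def unm (m : List Int) (l : List (Int × Char)) : List (Int × Char) :=
  l.filter (fun p => decide (p.2 = '(' ∧ p.1 ∉ m))

def stackOf (m : List Int) (l : List (Int × Char)) : List Int :=
  ((unm m l).reverse).map (fun p => p.1)

theorem chStr_eq_lparen_iff (c : Char) : chStr c = "(" ↔ c = '(' := by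
  constructor
  · intro h
    have := congrArg String.toList h
    simpa [chStr] using this
  · intro h; simp [h, chStr]

theorem chStr_ne_empty (c : Char) : chStr c ≠ "" := by
  intro h
  have := congrArg String.toList h
  simp [chStr] at this

theorem blank_append (xs : List String) (y : String) :
    blankLastParen (xs ++ [y]) =
      if y = "(" then some (xs ++ [""]) else (blankLastParen xs).map (· ++ [y]) := by
  induction xs with
  | nil => by_cases hy : y = "(" <;> simp [blankLastParen, hy]
  | cons x xs ih =>
    by_cases hy : y = "("
    · subst hy
      simp [blankLastParen, ih]
    · simp only [List.cons_append, blankLastParen, ih, if_neg hy]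
      cases hb : blankLastParen xs with
      | some t => simp
      | none => by_cases hx : x = "(" <;> simp [hx]

theorem tmpOf_append_singleton (m : List Int) (l : List (Int × Char)) (p : Int × Char) :
    tmpOf m (l ++ [p]) = tmpOf m l ++ (entryOf m p).toList := by
  cases h : entryOf m p <;> simp [tmpOf, List.filterMap_append, h]

theorem tmpOf_congr (m₁ m₂ : List Int) (l : List (Int × Char))
    (h : ∀ q ∈ l, (q.1 ∈ m₁ ↔ q.1 ∈ m₂)) : tmpOf m₁ l = tmpOf m₂ l := by
  unfold tmpOf
  apply List.filterMap_congr
  intro q hq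
  unfold entryOf
  rw [if_congr (h q hq) rfl rfl]

theorem unm_append_singleton (m : List Int) (l : List (Int × Char)) (p : Int × Char) :
    unm m (l ++ [p]) = unm m l ++ (if p.2 = '(' ∧ p.1 ∉ m then [p] else []) := by
  simp [unm, List.filter_append]
  split_ifs with h <;> simp [h]

theorem blank_tmpOf_nil (l : List (Int × Char)) (m : List Int)
    (h : unm m l = []) : blankLastParen (tmpOf m l) = none := by
  induction l using List.reverseRecOn with
  | nil => simp [tmpOf, blankLastParen]
  | append_singleton l' q ih =>
    rw [unm_append_singleton] at h
    rcases List.append_eq_nil_iff.mp h with ⟨h1, h2⟩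
    have hnp : ¬(q.2 = '(' ∧ q.1 ∉ m) := by
      intro hc; rw [if_pos hc] at h2; simp at h2
    rw [tmpOf_append_singleton]
    by_cases hq : q.1 ∈ m
    · by_cases hq2 : q.2 = '('
      · have he : entryOf m q = some "" := by simp [entryOf, hq, hq2]
        rw [he]
        simp only [Option.toList_some]
        rw [blank_append, if_neg (by decide : ¬("" : String) = "("), ih h1]
        rfl
      · have he : entryOf m q = none := by simp [entryOf, hq, hq2]
        rw [he]
        simpa using ih h1
    · have hq2 : q.2 ≠ '(' := fun hc => hnp ⟨hc, hq⟩
      have he : entryOf m q = some (chStr q.2) := by simp [entryOf, hq]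
      rw [he]
      simp only [Option.toList_some]
      rw [blank_append, if_neg (fun hc => hq2 ((chStr_eq_lparen_iff q.2).mp hc)), ih h1]
      rfl

theorem blank_tmpOf_last (l : List (Int × Char)) (m : List Int)
    (hnd : (l.map Prod.fst).Nodup) (U₀ : List (Int × Char)) (u : Int × Char)
    (h : unm m l = U₀ ++ [u]) :
    blankLastParen (tmpOf m l) = some (tmpOf (u.1 :: m) l) := by
  induction l using List.reverseRecOn generalizing U₀ with
  | nil => simp [unm] at h
  | append_singleton l' q ih =>
    have hmap : ((l' ++ [q]).map Prod.fst) = l'.map Prod.fst ++ [q.1] := by simp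
    rw [hmap, List.nodup_append] at hnd
    obtain ⟨hnd', -, hdisj⟩ := hnd
    have hq1 : q.1 ∉ l'.map Prod.fst := by
      intro hc
      exact (hdisj q.1 hc q.1 (List.mem_singleton.mpr rfl)) rfl
    rw [unm_append_singleton] at h
    by_cases hP : q.2 = '(' ∧ q.1 ∉ m
    · rw [if_pos hP] at h
      have hu : u = q := by
        have h1 := congrArg List.getLast? h
        rw [List.getLast?_concat, List.getLast?_concat] at h1
        exact (Option.some.inj h1).symm
      subst hu
      rw [tmpOf_append_singleton]
      have he : entryOf m u = some "(" := by
        simp [entryOf, hP.2, hP.1, chStr]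
      rw [he]
      simp only [Option.toList_some]
      rw [blank_append, if_pos rfl, tmpOf_append_singleton]
      have he2 : entryOf (u.1 :: m) u = some "" := by simp [entryOf, hP.1]
      rw [he2]
      have hcg : tmpOf (u.1 :: m) l' = tmpOf m l' := by
        apply tmpOf_congr
        intro r hr
        have : r.1 ≠ u.1 := by
          intro hc
          exact hq1 (hc ▸ List.mem_map_of_mem hr)
        simp [this]
      rw [hcg]
      rfl
    · rw [if_neg hP, List.append_nil] at h
      have humem : u ∈ l' := by
        have : u ∈ unm m l' := by rw [h]; simp
        exact List.mem_of_mem_filter this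
      have hune : u.1 ≠ q.1 := by
        intro hc
        exact hq1 (hc ▸ List.mem_map_of_mem humem)
      have ihh := ih hnd' U₀ h
      rw [tmpOf_append_singleton, tmpOf_append_singleton]
      have hee : entryOf (u.1 :: m) q = entryOf m q := by
        by_cases hq : q.1 ∈ m
        · simp [entryOf, hq]
        · have hnm : ¬ q.1 ∈ (u.1 :: m) := by simp [Ne.symm hune, hq]
          simp [entryOf, hq, hnm]
      cases hcase : entryOf m q with
      | none =>
        rw [hcase] at hee
        rw [hee]
        simpa using ihh
      | some y =>
        have hy : ¬ y = "(" := by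
          unfold entryOf at hcase
          by_cases hq : q.1 ∈ m
          · rw [if_pos hq] at hcase
            by_cases hq2 : q.2 = '('
            · rw [if_pos hq2] at hcase
              rw [← Option.some.inj hcase]
              decide
            · rw [if_neg hq2] at hcase; cases hcase
          · rw [if_neg hq] at hcase
            rw [← Option.some.inj hcase]
            intro hc
            exact hP ⟨(chStr_eq_lparen_iff _).mp hc, hq⟩
        rw [hcase] at hee
        rw [hee]
        simp only [Option.toList_some]
        rw [blank_append, if_neg hy, ihh]
        rfl

theorem step_sim (done : List (Int × Char)) (p : Int × Char) (m : List Int)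
    (hnd : ((done ++ [p]).map Prod.fst).Nodup)
    (hm : ∀ j ∈ m, ∃ q ∈ done, j = q.1) :
    (parseAltStep (stackOf m done, m) p).1
        = stackOf (parseAltStep (stackOf m done, m) p).2 (done ++ [p])
    ∧ parseStep (tmpOf m done) p.2 = tmpOf (parseAltStep (stackOf m done, m) p).2 (done ++ [p])
    ∧ (∀ j ∈ (parseAltStep (stackOf m done, m) p).2, ∃ q ∈ done ++ [p], j = q.1) := by
  have hmap : ((done ++ [p]).map Prod.fst) = done.map Prod.fst ++ [p.1] := by simp
  rw [hmap, List.nodup_append] at hnd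
  obtain ⟨hndd, -, hdisj⟩ := hnd
  have hp1 : p.1 ∉ done.map Prod.fst :=
    fun hc => (hdisj p.1 hc p.1 (List.mem_singleton.mpr rfl)) rfl
  have hpm : p.1 ∉ m := by
    intro hc
    obtain ⟨q, hq, hqe⟩ := hm p.1 hc
    exact hp1 (hqe ▸ List.mem_map_of_mem hq)
  have hdom : ∀ j ∈ m, ∃ q ∈ done ++ [p], j = q.1 := by
    intro j hj
    obtain ⟨q, hq, hqe⟩ := hm j hj
    exact ⟨q, List.mem_append_left _ hq, hqe⟩
  by_cases hpo : p.2 = '('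
  · have hstep : parseAltStep (stackOf m done, m) p = (p.1 :: stackOf m done, m) := by
      simp [parseAltStep, hpo]
    rw [hstep]
    refine ⟨?_, ?_, hdom⟩
    · simp only
      rw [stackOf, stackOf, unm_append_singleton, if_pos ⟨hpo, hpm⟩]
      simp
    · have hne : ¬ p.2 = ')' := by rw [hpo]; decide
      simp only [parseStep, if_neg hne]
      rw [tmpOf_append_singleton]
      have he : entryOf m p = some (chStr p.2) := by simp [entryOf, hpm]
      rw [he]
      rfl
  · by_cases hpc : p.2 = ')'
    · cases hst : stackOf m done with
      | nil =>
        have hstep : parseAltStep ([], m) p = ([], m) := by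
          simp [parseAltStep, hpc]
        have hunil : unm m done = [] := by
          rw [stackOf] at hst
          simpa using hst
        rw [hstep]
        refine ⟨?_, ?_, hdom⟩
        · simp only
          rw [stackOf, unm_append_singleton,
            if_neg (fun hc => hpo hc.1), List.append_nil, hunil]
          simp
        · simp only [parseStep, if_pos hpc, blank_tmpOf_nil done m hunil]
          rw [tmpOf_append_singleton]
          have he : entryOf m p = some (chStr p.2) := by simp [entryOf, hpm]
          rw [he]
          rfl
      | cons j rest =>
        obtain hU | ⟨U₀, u, hU⟩ := (unm m done).eq_nil_or_concat
        · rw [stackOf, hU] at hst; simp at hst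
        rw [List.concat_eq_append] at hU
        have hrev : stackOf m done = u.1 :: ((U₀.reverse).map (fun q => q.1)) := by
          rw [stackOf, hU]; simp
        rw [hst] at hrev
        obtain ⟨hj, hrest⟩ : j = u.1 ∧ rest = (U₀.reverse).map (fun q => q.1) := by
          exact ⟨(List.cons.injEq _ _ _ _ ▸ hrev).1, (List.cons.injEq _ _ _ _ ▸ hrev).2⟩
        have humem : u ∈ done := List.mem_of_mem_filter (by rw [hU]; simp : u ∈ unm m done)
        have hup : u.1 ≠ p.1 := by
          intro hc
          exact hp1 (hc ▸ List.mem_map_of_mem humem)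
        have hstep : parseAltStep (j :: rest, m) p
            = (rest, PySem.Set.add (PySem.Set.add m j) p.1) := by
          simp [parseAltStep, hpc]
        rw [hstep]
        subst hj
        -- membership in the new matched set
        have hmem' : ∀ x, x ∈ PySem.Set.add (PySem.Set.add m u.1) p.1 ↔
            (x ∈ m ∨ x = u.1) ∨ x = p.1 := by
          intro x
          rw [PySem.Set.mem_add, PySem.Set.mem_add]
        -- nodup of the firsts of unm
        have hnun : ((unm m done).map Prod.fst).Nodup :=
          hndd.sublist (List.Sublist.map Prod.fst List.filter_sublist)
        have hu1 : u.1 ∉ U₀.map Prod.fst := by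
          rw [hU] at hnun
          simp only [List.map_append, List.nodup_append] at hnun
          intro hc
          exact (hnun.2.2 u.1 hc u.1 (List.mem_singleton.mpr rfl)) rfl
        have hU0 : ∀ q ∈ U₀, q.1 ≠ u.1 := by
          intro q hq hc
          exact hu1 (hc ▸ List.mem_map_of_mem hq)
        -- the new unmatched list
        have hunm' : unm (PySem.Set.add (PySem.Set.add m u.1) p.1) done = U₀ := by
          have h1 : unm (PySem.Set.add (PySem.Set.add m u.1) p.1) done
              = (unm m done).filter (fun q => decide (¬ q.1 = u.1)) := by
            rw [unm, unm, List.filter_filter]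
            apply List.filter_congr
            intro q hq
            have hqp : q.1 ≠ p.1 := by
              intro hc
              exact hp1 (hc ▸ List.mem_map_of_mem hq)
            simp only [hmem']
            rw [← Bool.decide_and, decide_eq_decide]
            constructor
            · rintro ⟨hl, hr⟩
              exact ⟨fun hc => hr (Or.inl (Or.inr hc)), hl, fun hc => hr (Or.inl (Or.inl hc))⟩
            · rintro ⟨hne, hl, hnm⟩
              exact ⟨hl, by rintro ((h | h) | h); exacts [hnm h, hne h, hqp h]⟩
          rw [h1, hU, List.filter_append]
          rw [List.filter_eq_self.mpr (fun q hq => by simpa using hU0 q hq)]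
          simp
        refine ⟨?_, ?_, ?_⟩
        · simp only
          rw [stackOf, unm_append_singleton, if_neg (fun hc => hpo hc.1),
            List.append_nil, hunm', hrest]
        · simp only [parseStep, if_pos hpc,
            blank_tmpOf_last done m hndd U₀ u hU]
          rw [tmpOf_append_singleton]
          have he : entryOf (PySem.Set.add (PySem.Set.add m u.1) p.1) p = none := by
            unfold entryOf
            rw [if_pos ((hmem' p.1).mpr (Or.inr rfl)), if_neg hpo]
          rw [he, Option.toList_none, List.append_nil]
          apply tmpOf_congr
          intro q hq
          have hqp : q.1 ≠ p.1 := by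
            intro hc
            exact hp1 (hc ▸ List.mem_map_of_mem hq)
          rw [hmem' q.1]
          simp [hqp]
          tauto
        · intro x hx
          rcases (hmem' x).mp hx with (hxm | hxu) | hxp
          · exact hdom x hxm
          · exact ⟨u, List.mem_append_left _ humem, hxu⟩
          · exact ⟨p, List.mem_append_right _ (List.mem_singleton.mpr rfl), hxp⟩
    · have hstep : parseAltStep (stackOf m done, m) p = (stackOf m done, m) := by
        simp [parseAltStep, hpo, hpc]
      rw [hstep]
      refine ⟨?_, ?_, hdom⟩
      · simp only
        rw [stackOf, stackOf, unm_append_singleton,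
          if_neg (fun hc => hpo hc.1), List.append_nil]
      · simp only [parseStep, if_neg hpc]
        rw [tmpOf_append_singleton]
        have he : entryOf m p = some (chStr p.2) := by simp [entryOf, hpm]
        rw [he]
        rfl

theorem sim (todo done : List (Int × Char)) (m : List Int)
    (hnd : ((done ++ todo).map Prod.fst).Nodup)
    (hm : ∀ j ∈ m, ∃ q ∈ done, j = q.1) :
    (todo.map Prod.snd).foldl parseStep (tmpOf m done)
      = tmpOf (todo.foldl parseAltStep (stackOf m done, m)).2 (done ++ todo) := by
  induction todo generalizing done m with
  | nil => simp
  | cons p todo' ih =>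
    have hsub : (done ++ [p]).Sublist (done ++ p :: todo') :=
      List.Sublist.append_left ((List.nil_sublist todo').cons₂ p) done
    have hnd1 : ((done ++ [p]).map Prod.fst).Nodup := hnd.sublist (hsub.map Prod.fst)
    obtain ⟨hs, ht, hd⟩ := step_sim done p m hnd1 hm
    simp only [List.map_cons, List.foldl_cons]
    rw [ht]
    have hpair : parseAltStep (stackOf m done, m) p
        = (stackOf (parseAltStep (stackOf m done, m) p).2 (done ++ [p]),
           (parseAltStep (stackOf m done, m) p).2) := by
      exact Prod.ext hs rfl
    rw [hpair]
    have hnd2 : (((done ++ [p]) ++ todo').map Prod.fst).Nodup := by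
      rw [List.append_assoc]
      simpa using hnd
    have := ih (done ++ [p]) ((parseAltStep (stackOf m done, m) p).2) hnd2 hd
    rw [List.append_assoc] at this
    simpa using this

theorem filter_tmpOf (m : List Int) (l : List (Int × Char)) :
    (tmpOf m l).filter (fun ch => ch ≠ "")
      = l.filterMap (fun p => if p.1 ∈ m then none else some (chStr p.2)) := by
  induction l with
  | nil => simp [tmpOf]
  | cons p l ih =>
    simp only [tmpOf, ne_eq, decide_not] at ih
    by_cases hq : p.1 ∈ m
    · by_cases hq2 : p.2 = '('
      · have he : entryOf m p = some "" := by simp [entryOf, hq, hq2]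
        simp [tmpOf, he, hq, ih]
      · have he : entryOf m p = none := by simp [entryOf, hq, hq2]
        simp [tmpOf, he, hq, ih]
    · have he : entryOf m p = some (chStr p.2) := by simp [entryOf, hq]
      simp [tmpOf, he, hq, ih, chStr_ne_empty]

-- ===== VERDICT (by name: the statement is the Claim_ definition above) =====
theorem parse_spec : Claim_equal_parse := by
  intro s _
  unfold Spec_parse
  have hnd : ((PySem.List.enumerate s.toList 0).map Prod.fst).Nodup := by
    have hp := PySem.List.pairwise_lt_enumerate s.toList 0
    exact (List.pairwise_map.mpr hp).imp (fun h => ne_of_lt h)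
  have hsim := sim (PySem.List.enumerate s.toList 0) [] []
      (by simpa using hnd) (by intro j hj; simp at hj)
  have hmap : (PySem.List.enumerate s.toList 0).map Prod.snd = s.toList :=
    PySem.List.map_snd_enumerate s.toList 0
  rw [hmap] at hsim
  have h0 : tmpOf [] ([] : List (Int × Char)) = [] := rfl
  have h1 : stackOf [] ([] : List (Int × Char)) = [] := rfl
  rw [h0, h1, List.nil_append] at hsim
  unfold parse parse_alt
  simp only []
  rw [PySem.List.foldl_append_ite_eq_filter, hsim, List.nil_append, filter_tmpOf]
  rfl
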